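-- pv_equiv track=rewrite | github.com/kkilme/DLD | finding pi.py | rowDominance
-- ===== SOURCE A (Python) =====
-- import copy
--
-- def rowDominance(piConsist, deletedRow):
--     tempPC = copy.deepcopy(piConsist)
--     piConsistKeys = list(piConsist.keys())
--     for i in range(len(piConsist)-1):
--         for j in range(i+1, len(piConsist)):
--             l = tempPC[piConsistKeys[i]]
--             l2 = tempPC[piConsistKeys[j]]
--             tempSet = set(l+l2)
--             if(len(l) == len(tempSet) or len(l2) == len(tempSet)):
--                 if(len(l) >= len(l2)):
--                     deletedRow.append(piConsistKeys[j])
--                     del piConsist[piConsistKeys[j]]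
--                 else:
--                     deletedRow.append(piConsistKeys[i])
--                     del piConsist[piConsistKeys[i]]
--                 return rowDominance(piConsist, deletedRow)
--     return deletedRow
-- ===== SOURCE B (Python) =====
-- def rowDominance(piConsist, deletedRow):
--     # One forward sweep with precomputed (len, set) per row; no deepcopy, no
--     # restart-from-scratch recursion.  Mutates piConsist and deletedRow like the original.
--     pending = [(k, len(v), set(v)) for k, v in piConsist.items()]
--     while pending:
--         kr, nr, sr = pending.pop(0)
--         survivors = []
--         for idx in range(len(pending)):
--             ks, ns, ss = pending[idx]
--             u = len(sr | ss)
--             if nr == u or ns == u: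
--                 if nr >= ns:
--                     deletedRow.append(ks)
--                     del piConsist[ks]
--                 else:
--                     deletedRow.append(kr)
--                     del piConsist[kr]
--                     survivors.extend(pending[idx:])
--                     break
--             else:
--                 survivors.append(pending[idx])
--         pending = survivors
--     return deletedRow
-- ===== Notes on version B (the rewrite author's own statement) =====
-- stated objective: faster
-- what changed: A restarts the whole quadratic scan from scratch after every deletion (recursing with a fresh deepcopy and rebuilding set(l+l2) for every pair); B precomputes each row's length and set once and performs a single forward sweep that deletes dominated rows in place and simply continues the scan, which is exact because deletions never change the dominance relation between surviving rows.
import Mathlib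
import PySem

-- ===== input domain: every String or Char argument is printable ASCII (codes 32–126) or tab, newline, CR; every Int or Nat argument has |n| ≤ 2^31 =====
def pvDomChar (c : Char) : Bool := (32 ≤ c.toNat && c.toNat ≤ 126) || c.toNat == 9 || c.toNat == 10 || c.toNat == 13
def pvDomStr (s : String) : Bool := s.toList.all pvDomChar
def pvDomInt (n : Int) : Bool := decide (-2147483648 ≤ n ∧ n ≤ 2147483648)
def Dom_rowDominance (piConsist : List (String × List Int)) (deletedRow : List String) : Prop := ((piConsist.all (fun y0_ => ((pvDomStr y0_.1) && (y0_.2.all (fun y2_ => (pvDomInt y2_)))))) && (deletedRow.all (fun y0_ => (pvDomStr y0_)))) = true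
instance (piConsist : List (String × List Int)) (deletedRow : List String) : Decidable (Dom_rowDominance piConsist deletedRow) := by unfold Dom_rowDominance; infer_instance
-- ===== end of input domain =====

-- B replaces A's restart-from-scratch recursion (deepcopy + set() rebuilt per pair) by a single
-- forward sweep over rows whose (length, set) are precomputed once; the equivalence proved here is
-- about the RETURN value (both Pythons mutate piConsist and deletedRow identically).

-- ===== PORT A =====
-- inner 'for j' loop of A: scan the keys after ki; the first dominating pair decides the deleted key

def findAj (t : PySem.Dict String (List Int)) (ki : String) : List String → Option String
  | [] => none
  | kj :: rest =>
    let l := t.getD ki []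
    let l2 := t.getD kj []
    let tempSet : PySem.Set Int := PySem.Set.ofList (l ++ l2)
    if l.length == tempSet.length || l2.length == tempSet.length then
      some (if l2.length ≤ l.length then kj else ki)
    else findAj t ki rest

-- outer 'for i' loop of A

def findA (t : PySem.Dict String (List Int)) : List String → Option String
  | [] => none
  | ki :: rest =>
    match findAj t ki rest with
    | some k => some k
    | none => findA t rest

-- (termination facts for the port, cited by decreasing_by)

theorem findAj_mem {t : PySem.Dict String (List Int)} {ki k : String} {ks : List String}
    (h : findAj t ki ks = some k) : k = ki ∨ k ∈ ks := by
  induction ks with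
  | nil => simp [findAj] at h
  | cons kj rest ih =>
    simp only [findAj] at h
    split at h
    · cases h; split <;> simp_all
    · rcases ih h with h' | h' <;> simp_all

theorem findA_mem {t : PySem.Dict String (List Int)} {k : String} {ks : List String}
    (h : findA t ks = some k) : k ∈ ks := by
  induction ks with
  | nil => simp [findA] at h
  | cons ki rest ih =>
    simp only [findA] at h
    split at h
    · rename_i h'; cases h
      rcases findAj_mem h' with h'' | h'' <;> simp_all
    · simp_all

def rowDominance (piConsist : List (String × List Int)) (deletedRow : List String) : List String :=
  match h : findA (PySem.Dict.mk piConsist) (PySem.Dict.mk piConsist).keys with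
  | some k =>
      rowDominance ((PySem.Dict.mk piConsist).erase k).items (deletedRow ++ [k])
  | none => deletedRow
termination_by piConsist.length
decreasing_by
  have hk : k ∈ piConsist.map Prod.fst := findA_mem h
  simp only [PySem.Dict.erase]
  rw [List.length_filter_lt_length_iff_exists]
  rcases List.mem_map.mp hk with ⟨p, hp, hpk⟩
  exact ⟨p, hp, by simp [hpk]⟩

-- ===== PORT B =====
-- the "for idx in range(len(pending))" loop of B: compare row r against the rows after it,
-- returning (surviving pending rows, deletedRow); stops early when r itself is deleted

def rowInner (r : String × Int × PySem.Set Int) :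
    List (String × Int × PySem.Set Int) → List String →
    List (String × Int × PySem.Set Int) × List String
  | [], acc => ([], acc)
  | s :: rest, acc =>
    let u := PySem.Set.len (PySem.Set.union r.2.2 s.2.2)
    if r.2.1 == u || s.2.1 == u then
      if s.2.1 ≤ r.2.1 then rowInner r rest (acc ++ [s.1])
      else (s :: rest, acc ++ [r.1])
    else
      let p := rowInner r rest acc
      (s :: p.1, p.2)

-- (termination fact for the port, cited by decreasing_by)

theorem rowInner_fst_length_le (r : String × Int × PySem.Set Int)
    (l : List (String × Int × PySem.Set Int)) (acc : List String) :
    (rowInner r l acc).1.length ≤ l.length := by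
  induction l generalizing acc with
  | nil => simp [rowInner]
  | cons s rest ih =>
    simp only [rowInner]
    split
    · split
      · exact le_trans (ih _) (Nat.le_succ _)
      · simp
    · simpa using ih acc

-- the 'while pending' loop of B

def rowSweep : List (String × Int × PySem.Set Int) → List String → List String
  | [], acc => acc
  | r :: rest, acc =>
    let p := rowInner r rest acc
    rowSweep p.1 p.2
termination_by l => l.length
decreasing_by
  exact Nat.lt_succ_of_le (rowInner_fst_length_le r rest acc)

def rowDominance_alt (piConsist : List (String × List Int)) (deletedRow : List String) : List String :=
  -- pending = [(k, len(v), set(v)) for k, v in piConsist.items()]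
  rowSweep (piConsist.map (fun p => (p.1, PySem.List.len p.2, PySem.Set.ofList p.2))) deletedRow

-- ===== PRECONDITION & SPEC =====
-- Pre_ only requires the association list to represent a genuine Python dict: distinct keys
-- (a dict cannot hold duplicate keys, so this excludes no input the Python function receives).
def Pre_rowDominance (piConsist : List (String × List Int)) (deletedRow : List String) : Prop :=
  (piConsist.map Prod.fst).Nodup

instance (piConsist : List (String × List Int)) (deletedRow : List String) : Decidable (Pre_rowDominance piConsist deletedRow) := by unfold Pre_rowDominance; infer_instance

def pvWitness_rowDominance : (List (String × List Int)) × List String :=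
  ([("a", [1, 2]), ("b", [2]), ("c", [3, 4, 5])], ["x"])

def Spec_rowDominance (piConsist : List (String × List Int)) (deletedRow : List String) (out : List String) : Prop := out = rowDominance_alt piConsist deletedRow
instance (piConsist : List (String × List Int)) (deletedRow : List String) (out : List String) : Decidable (Spec_rowDominance piConsist deletedRow out) := by unfold Spec_rowDominance; infer_instance

-- ===== CLAIM (what is proved, stated in full; the proofs are below) =====
def Claim_equal_rowDominance : Prop := ∀ (piConsist : List (String × List Int)) (deletedRow : List String), Dom_rowDominance piConsist deletedRow → Pre_rowDominance piConsist deletedRow → Spec_rowDominance piConsist deletedRow (rowDominance piConsist deletedRow)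

-- ===== LEMMAS AND PROOFS =====
-- the enriched row B precomputes, and A's dominance test on two value lists

def enr (p : String × List Int) : String × Int × PySem.Set Int :=
  (p.1, PySem.List.len p.2, PySem.Set.ofList p.2)

def condv (l l2 : List Int) : Bool :=
  l.length == (PySem.Set.ofList (l ++ l2)).length || l2.length == (PySem.Set.ofList (l ++ l2)).length

theorem natCast_beq (a b : Nat) : (((a : Int) == (b : Int))) = (a == b) := by
  by_cases h : a = b <;> simp [h]

theorem union_ofList_length (a b : List Int) :
    (PySem.Set.union (PySem.Set.ofList a) (PySem.Set.ofList b)).length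
      = (PySem.Set.ofList (a ++ b)).length := by
  apply List.Perm.length_eq
  apply (List.perm_ext_iff_of_nodup ?_ ?_).mpr
  · intro x
    simp [PySem.Set.mem_union, PySem.Set.mem_ofList]
  · exact PySem.Set.nodup_union _ _ (PySem.Set.nodup_ofList a)
  · exact PySem.Set.nodup_ofList _

theorem cond_bridge (p q : String × List Int) :
    ((enr p).2.1 == PySem.Set.len (PySem.Set.union (enr p).2.2 (enr q).2.2)
      || (enr q).2.1 == PySem.Set.len (PySem.Set.union (enr p).2.2 (enr q).2.2))
      = condv p.2 q.2 := by
  simp only [enr, condv, PySem.Set.len, PySem.List.len, union_ofList_length, natCast_beq]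

theorem tie_bridge (p q : String × List Int) :
    ((enr q).2.1 ≤ (enr p).2.1) ↔ q.2.length ≤ p.2.length := by
  simp [enr, PySem.List.len]

theorem lookup_entry {pc : List (String × List Int)} {p : String × List Int}
    (hnd : (pc.map Prod.fst).Nodup) (hp : p ∈ pc) :
    (PySem.Dict.mk pc).getD p.1 [] = p.2 := by
  apply PySem.Dict.getD_of_mem_items
  · simpa using hp
  · simpa [PySem.Dict.keys, PySem.Dict.items] using hnd

theorem erase_decomp {P S : List (String × List Int)} {p : String × List Int}
    (hnd : ((P ++ p :: S).map Prod.fst).Nodup) :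
    ((PySem.Dict.mk (P ++ p :: S)).erase p.1).items = P ++ S := by
  simp only [List.map_append, List.map_cons, List.nodup_append, List.nodup_cons] at hnd
  simp only [PySem.Dict.erase, List.filter_append, List.filter_cons]
  have h1 : P.filter (fun q => !(q.1 == p.1)) = P := by
    apply List.filter_eq_self.mpr
    intro q hq
    have : q.1 ≠ p.1 := by
      intro he
      exact (hnd.2.2 q.1 (List.mem_map_of_mem hq) p.1 (by simp)) he
    simp [this]
  have h2 : S.filter (fun q => !(q.1 == p.1)) = S := by
    apply List.filter_eq_self.mpr
    intro q hq
    have : q.1 ≠ p.1 := by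
      intro he
      exact hnd.2.1.1 (by simpa [← he] using List.mem_map_of_mem (f := Prod.fst) hq)
    simp [this]
  simp [h1, h2]

theorem findAj_cons (t : PySem.Dict String (List Int)) (ki kj : String) (rest : List String) :
    findAj t ki (kj :: rest)
      = if condv (t.getD ki []) (t.getD kj []) then
          some (if (t.getD kj []).length ≤ (t.getD ki []).length then kj else ki)
        else findAj t ki rest := rfl

theorem findAj_none {t : PySem.Dict String (List Int)} {ki : String} {ks : List String}
    (h : ∀ kj ∈ ks, condv (t.getD ki []) (t.getD kj []) = false) :
    findAj t ki ks = none := by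
  induction ks with
  | nil => rfl
  | cons kj rest ih =>
    rw [findAj_cons, if_neg (by simp [h kj (by simp)])]
    exact ih fun b hb => h b (by simp [hb])

theorem findAj_some {t : PySem.Dict String (List Int)} {ki kj : String}
    {pre suf : List String}
    (hpre : ∀ b ∈ pre, condv (t.getD ki []) (t.getD b []) = false)
    (hc : condv (t.getD ki []) (t.getD kj []) = true) :
    findAj t ki (pre ++ kj :: suf)
      = some (if (t.getD kj []).length ≤ (t.getD ki []).length then kj else ki) := by
  induction pre with
  | nil => rw [List.nil_append, findAj_cons, if_pos hc]
  | cons b pre' ih =>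
    rw [List.cons_append, findAj_cons, if_neg (by simp [hpre b (by simp)])]
    exact ih fun b' hb => hpre b' (by simp [hb])

theorem findA_skip {t : PySem.Dict String (List Int)} {kd ks : List String}
    (h1 : List.Pairwise (fun a b => condv (t.getD a []) (t.getD b []) = false) kd)
    (h2 : ∀ a ∈ kd, ∀ b ∈ ks, condv (t.getD a []) (t.getD b []) = false) :
    findA t (kd ++ ks) = findA t ks := by
  induction kd with
  | nil => rfl
  | cons a kd' ih =>
    rw [List.cons_append]
    have hnone : findAj t a (kd' ++ ks) = none := by
      apply findAj_none
      intro b hb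
      rcases List.mem_append.mp hb with hb | hb
      · exact (List.pairwise_cons.mp h1).1 b hb
      · exact h2 a (by simp) b hb
    rw [show findA t (a :: (kd' ++ ks)) = match findAj t a (kd' ++ ks) with
          | some k => some k | none => findA t (kd' ++ ks) from rfl, hnone]
    exact ih (List.pairwise_cons.mp h1).2 fun a' ha' b hb => h2 a' (by simp [ha']) b hb

theorem keyfail_transport {pc l : List (String × List Int)}
    (hnd : (pc.map Prod.fst).Nodup) (hsub : ∀ x ∈ l, x ∈ pc)
    (h : List.Pairwise (fun p q => condv p.2 q.2 = false) l) :
    List.Pairwise (fun a b =>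
      condv ((PySem.Dict.mk pc).getD a []) ((PySem.Dict.mk pc).getD b []) = false)
      (l.map Prod.fst) := by
  rw [List.pairwise_map]
  refine h.imp_of_mem ?_
  intro a b ha hb hab
  rw [lookup_entry hnd (hsub a ha), lookup_entry hnd (hsub b hb)]
  exact hab

theorem findA_none_char {pd : List (String × List Int)} {pr : String × List Int}
    (hnd : ((pd ++ [pr]).map Prod.fst).Nodup)
    (h1 : List.Pairwise (fun p q => condv p.2 q.2 = false) (pd ++ [pr])) :
    findA (PySem.Dict.mk (pd ++ [pr])) (PySem.Dict.mk (pd ++ [pr])).keys = none := by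
  have hkeys : (PySem.Dict.mk (pd ++ [pr])).keys = (pd ++ [pr]).map Prod.fst := rfl
  rw [hkeys]
  have := findA_skip (t := PySem.Dict.mk (pd ++ [pr])) (ks := [])
    (keyfail_transport hnd (fun x hx => hx) h1) (by simp)
  simpa using this

theorem findA_some_char {pd pt pu : List (String × List Int)} {pr s : String × List Int}
    (hnd : ((pd ++ pr :: pt ++ s :: pu).map Prod.fst).Nodup)
    (h1 : List.Pairwise (fun p q => condv p.2 q.2 = false) (pd ++ [pr]))
    (h2 : ∀ x ∈ pd, ∀ y ∈ pt ++ s :: pu, condv x.2 y.2 = false)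
    (h3 : ∀ y ∈ pt, condv pr.2 y.2 = false)
    (hc : condv pr.2 s.2 = true) :
    findA (PySem.Dict.mk (pd ++ pr :: pt ++ s :: pu))
        (PySem.Dict.mk (pd ++ pr :: pt ++ s :: pu)).keys
      = some (if s.2.length ≤ pr.2.length then s.1 else pr.1) := by
  set pc := pd ++ pr :: pt ++ s :: pu with hpc
  set t := PySem.Dict.mk pc with ht
  have hmem : ∀ x ∈ pd, x ∈ pc := by intro x hx; simp [hpc, hx]
  have hprm : pr ∈ pc := by simp [hpc]
  have hsm : s ∈ pc := by simp [hpc]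
  have hptm : ∀ y ∈ pt, y ∈ pc := by intro y hy; simp [hpc, hy]
  have hkeys : t.keys = pc.map Prod.fst := rfl
  have hmap : pc.map Prod.fst
      = pd.map Prod.fst ++ pr.1 :: (pt.map Prod.fst ++ s.1 :: pu.map Prod.fst) := by
    simp [hpc]
  rw [hkeys, hmap]
  have hpw : List.Pairwise (fun a b =>
      condv (t.getD a []) (t.getD b []) = false) (pd.map Prod.fst) := by
    have := keyfail_transport hnd hmem ((List.pairwise_append.mp h1).1)
    simpa using this
  have hcross : ∀ a ∈ pd.map Prod.fst,
      ∀ b ∈ pr.1 :: (pt.map Prod.fst ++ s.1 :: pu.map Prod.fst),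
      condv (t.getD a []) (t.getD b []) = false := by
    intro a ha b hb
    rcases List.mem_map.mp ha with ⟨x, hx, rfl⟩
    rw [lookup_entry hnd (hmem x hx)]
    rcases List.mem_cons.mp hb with rfl | hb
    · rw [lookup_entry hnd hprm]
      exact (List.pairwise_append.mp h1).2.2 x hx pr (by simp)
    · rcases List.mem_append.mp hb with hb | hb
      · rcases List.mem_map.mp hb with ⟨y, hy, rfl⟩
        rw [lookup_entry hnd (hptm y hy)]
        exact h2 x hx y (by simp [hy])
      · rcases List.mem_cons.mp hb with rfl | hb
        · rw [lookup_entry hnd hsm]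
          exact h2 x hx s (by simp)
        · rcases List.mem_map.mp hb with ⟨y, hy, rfl⟩
          rw [lookup_entry hnd (by simp [hpc, hy] : y ∈ pc)]
          exact h2 x hx y (by simp [hy])
  rw [findA_skip hpw hcross]
  have hinner : findAj t pr.1 (pt.map Prod.fst ++ s.1 :: pu.map Prod.fst)
      = some (if (t.getD s.1 []).length ≤ (t.getD pr.1 []).length then s.1 else pr.1) := by
    apply findAj_some
    · intro b hb
      rcases List.mem_map.mp hb with ⟨y, hy, rfl⟩
      rw [lookup_entry hnd hprm, lookup_entry hnd (hptm y hy)]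
      exact h3 y hy
    · rw [lookup_entry hnd hprm, lookup_entry hnd hsm]
      exact hc
  rw [show findA t (pr.1 :: (pt.map Prod.fst ++ s.1 :: pu.map Prod.fst))
        = match findAj t pr.1 (pt.map Prod.fst ++ s.1 :: pu.map Prod.fst) with
          | some k => some k
          | none => findA t (pt.map Prod.fst ++ s.1 :: pu.map Prod.fst) from rfl,
      hinner, lookup_entry hnd hprm, lookup_entry hnd hsm]

theorem rowSweep_nil (acc : List String) : rowSweep [] acc = acc := by rw [rowSweep]

theorem rowSweep_cons (r : String × Int × PySem.Set Int)
    (rest : List (String × Int × PySem.Set Int)) (acc : List String) :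
    rowSweep (r :: rest) acc = rowSweep (rowInner r rest acc).1 (rowInner r rest acc).2 := by
  rw [rowSweep]

theorem rowInner_cons (p s : String × List Int)
    (rest : List (String × Int × PySem.Set Int)) (acc : List String) :
    rowInner (enr p) (enr s :: rest) acc
      = if condv p.2 s.2 then
          if s.2.length ≤ p.2.length then rowInner (enr p) rest (acc ++ [s.1])
          else (enr s :: rest, acc ++ [p.1])
        else (enr s :: (rowInner (enr p) rest acc).1, (rowInner (enr p) rest acc).2) := by
  simp only [rowInner]
  rw [cond_bridge]
  by_cases hc : condv p.2 s.2
  · rw [if_pos hc, if_pos hc, if_congr (tie_bridge p s) rfl rfl]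
    rfl
  · rw [if_neg (by simp [hc]), if_neg (by simp [hc])]

def INV (pd : List (String × List Int)) (pr : String × List Int)
    (pt pu : List (String × List Int)) : Prop :=
  List.Pairwise (fun p q => condv p.2 q.2 = false) (pd ++ [pr])
  ∧ (∀ x ∈ pd, ∀ y ∈ pt ++ pu, condv x.2 y.2 = false)
  ∧ (∀ y ∈ pt, condv pr.2 y.2 = false)

theorem main_lemma (pd : List (String × List Int)) (pr : String × List Int)
    (pt pu : List (String × List Int)) (acc : List String)
    (hnd : ((pd ++ pr :: pt ++ pu).map Prod.fst).Nodup) (hinv : INV pd pr pt pu) :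
    rowDominance (pd ++ pr :: pt ++ pu) acc
      = rowSweep (pt.map enr ++ (rowInner (enr pr) (pu.map enr) acc).1)
          (rowInner (enr pr) (pu.map enr) acc).2 := by
  obtain ⟨h1, h2, h3⟩ := hinv
  cases pu with
  | nil =>
    -- current row pr has been compared against everything after it: move on
    rw [show rowInner (enr pr) (List.map enr []) acc = ([], acc) from rfl]
    simp only [List.append_nil]
    cases pt with
    | nil =>
      -- nothing left: A finds no dominating pair and stops
      simp only [List.map_nil]
      rw [rowSweep_nil, rowDominance]
      split
      · rename_i k heq
        rw [findA_none_char (by simpa using hnd) h1] at heq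
        cases heq
      · rfl
    | cons t0 pt' =>
      have hrec := main_lemma (pd ++ [pr]) t0 [] pt' acc
        (by simpa using hnd)
        ⟨List.pairwise_append.mpr ⟨h1, List.pairwise_singleton _ _, by
            intro x hx y hy
            rcases List.mem_singleton.mp hy with rfl
            rcases List.mem_append.mp hx with hx | hx
            · exact h2 x hx _ (by simp)
            · rcases List.mem_singleton.mp hx with rfl
              exact h3 _ (by simp)⟩,
          by
            intro x hx y hy
            simp only [List.nil_append] at hy
            rcases List.mem_append.mp hx with hx | hx
            · exact h2 x hx y (by simp [hy])
            · rcases List.mem_singleton.mp hx with rfl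
              exact h3 y (by simp [hy]),
          by simp⟩
      have heq : (pd ++ [pr]) ++ t0 :: [] ++ pt' = pd ++ pr :: (t0 :: pt') ++ [] := by simp
      rw [heq] at hrec
      simp only [List.append_nil] at hrec
      rw [List.map_cons, rowSweep_cons]
      simpa using hrec
  | cons s pu' =>
    -- compare pr against the next untested row s
    rw [List.map_cons, rowInner_cons]
    cases hcond : condv pr.2 s.2 with
    | false =>
      try simp only [reduceIte]
      have hrec := main_lemma pd pr (pt ++ [s]) pu' acc
        (by simpa using hnd)
        ⟨h1,
          by
            intro x hx y hy
            apply h2 x hx y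
            simp only [List.append_assoc, List.singleton_append] at hy
            simpa using hy,
          by
            intro y hy
            rcases List.mem_append.mp hy with hy | hy
            · exact h3 y hy
            · rcases List.mem_singleton.mp hy with rfl
              exact hcond⟩
      have heq : pd ++ pr :: (pt ++ [s]) ++ pu' = pd ++ pr :: pt ++ s :: pu' := by simp
      rw [heq] at hrec
      rw [hrec]
      simp [List.map_append]
    | true =>
      simp only [reduceIte]
      by_cases ht : s.2.length ≤ pr.2.length
      · -- the later row s is dominated and deleted; the scan continues at pr
        rw [if_pos ht, rowDominance]
        split
        · rename_i k heq
          rw [findA_some_char hnd h1 h2 h3 hcond] at heq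
          cases heq
          rw [if_pos ht]
          have hernd : ((((PySem.Dict.mk (pd ++ pr :: pt ++ s :: pu')).erase s.1).items).map Prod.fst).Nodup :=
            List.Nodup.sublist (List.Sublist.map Prod.fst List.filter_sublist) hnd
          have he : ((PySem.Dict.mk (pd ++ pr :: pt ++ s :: pu')).erase s.1).items
              = pd ++ pr :: pt ++ pu' := by
            exact erase_decomp (P := pd ++ pr :: pt) (S := pu') (p := s)
              (by simpa using hnd)
          rw [he]
          exact main_lemma pd pr pt pu' (acc ++ [s.1]) (by rw [he] at hernd; exact hernd)
            ⟨h1,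
              fun x hx y hy => h2 x hx y (by
                rcases List.mem_append.mp hy with hy | hy
                · simp [hy]
                · simp [hy]),
              h3⟩
        · rename_i heq
          rw [findA_some_char hnd h1 h2 h3 hcond] at heq
          cases heq
      · -- pr itself is dominated by s and deleted; the scan restarts at the next row
        rw [if_neg ht, rowDominance]
        split
        · rename_i k heq
          rw [findA_some_char hnd h1 h2 h3 hcond] at heq
          cases heq
          rw [if_neg ht]
          have heq3 : pd ++ pr :: pt ++ s :: pu' = pd ++ pr :: (pt ++ s :: pu') := by simp
          have he : ((PySem.Dict.mk (pd ++ pr :: pt ++ s :: pu')).erase pr.1).items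
              = pd ++ (pt ++ s :: pu') := by
            rw [heq3]
            exact erase_decomp (P := pd) (S := pt ++ s :: pu') (p := pr)
              (by simpa using hnd)
          have hernd : (((pd ++ (pt ++ s :: pu'))).map Prod.fst).Nodup := by
            rw [← he]
            exact List.Nodup.sublist (List.Sublist.map Prod.fst List.filter_sublist) hnd
          rw [he]
          cases pt with
          | nil =>
            have hrec := main_lemma pd s [] pu' (acc ++ [pr.1])
              (by simpa using hernd)
              ⟨List.pairwise_append.mpr ⟨(List.pairwise_append.mp h1).1,
                  List.pairwise_singleton _ _, by
                    intro x hx y hy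
                    rcases List.mem_singleton.mp hy with rfl
                    exact h2 x hx _ (by simp)⟩,
                by
                  intro x hx y hy
                  simp only [List.nil_append] at hy
                  exact h2 x hx y (by simp [hy]),
                by simp⟩
            have heq2 : pd ++ s :: [] ++ pu' = pd ++ ([] ++ s :: pu') := by simp
            rw [heq2] at hrec
            rw [hrec]
            simp only [List.map_nil, List.nil_append]
            rw [rowSweep_cons]
          | cons t0 pt'' =>
            have hrec := main_lemma pd t0 [] (pt'' ++ s :: pu') (acc ++ [pr.1])
              (by simpa using hernd)
              ⟨List.pairwise_append.mpr ⟨(List.pairwise_append.mp h1).1,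
                  List.pairwise_singleton _ _, by
                    intro x hx y hy
                    rcases List.mem_singleton.mp hy with rfl
                    exact h2 x hx _ (by simp)⟩,
                by
                  intro x hx y hy
                  simp only [List.nil_append] at hy
                  apply h2 x hx y
                  rcases List.mem_append.mp hy with hy | hy
                  · simp [hy]
                  · rcases List.mem_cons.mp hy with rfl | hy
                    · simp
                    · simp [hy],
                by simp⟩
            have heq2 : pd ++ t0 :: [] ++ (pt'' ++ s :: pu') = pd ++ ((t0 :: pt'') ++ s :: pu') := by simp
            rw [heq2] at hrec
            rw [hrec]
            simp only [List.map_nil, List.map_cons, List.map_append, List.nil_append,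
              List.cons_append]
            rw [rowSweep_cons]
        · rename_i heq
          rw [findA_some_char hnd h1 h2 h3 hcond] at heq
          cases heq
termination_by ((pd ++ pr :: pt ++ pu).length, pt.length + pu.length, pu.length)
decreasing_by
  all_goals
    subst_vars
    simp only [List.length_append, List.length_cons, List.length_nil]
    rw [Prod.lex_def, Prod.lex_def]
    simp only []
    omega

-- ===== VERDICT (by name: the statement is the Claim_ definition above) =====
theorem rowDominance_spec : Claim_equal_rowDominance := by
  intro pc dr _hdom hpre
  unfold Spec_rowDominance rowDominance_alt
  cases pc with
  | nil =>
    rw [rowDominance]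
    split
    · rename_i k heq
      simp [findA, PySem.Dict.keys] at heq
    · simp [rowSweep_nil]
  | cons p rest =>
    have hrec := main_lemma [] p [] rest dr (by simpa [Pre_rowDominance] using hpre)
      ⟨List.pairwise_singleton _ _, by simp, by simp⟩
    have heq : ([] : List (String × List Int)) ++ p :: [] ++ rest = p :: rest := by simp
    rw [heq] at hrec
    rw [hrec]
    simp only [List.map_nil, List.nil_append, List.map_cons]
    rw [rowSweep_cons]
    exact rfl
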